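-- pv_equiv track=rewrite | github.com/MikeAlwaysCode/algorithm_py | Contests/LeetCodePython/Test.py | minNumBooths
-- ===== SOURCE A (Python) =====
-- from collections import Counter, defaultdict, deque
-- from typing import List, Optional
--
-- def minNumBooths(demand: List[str]) -> int:
--     d = dict()
--     for dem in demand:
--         cnt = Counter(dem)
--         for k, v in cnt.items():
--             if k not in d:
--                 d[k] = v
--             else:
--                 d[k] = max(d[k], v)
--     return sum(d.values())
-- ===== SOURCE B (Python) =====
-- def minNumBooths(demand):
--     # Different algorithm: instead of summing per-character maxima, label every
--     # occurrence of a character in a string with its ordinal (ch, j) -- the j-th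
--     # occurrence of ch claims slot (ch, j) -- and return the number of distinct
--     # slots claimed across all strings (both equal sum_c max_s count(s, c)).
--     slots = set()
--     for s in demand:
--         seen = {}
--         for ch in s:
--             j = seen.get(ch, 0) + 1
--             seen[ch] = j
--             slots.add((ch, j))
--     return len(slots)
-- ===== Notes on version B (the rewrite author's own statement) =====
-- stated objective: faster
-- what changed: Replaces A's per-string Counter merged into a running max-dict that is then summed by an occurrence-slot algorithm: every occurrence of a character is labelled with its ordinal within its string, the pairs (char, ordinal) are collected in one set, and the answer is that set's cardinality - no max and no final sum are computed.
import Mathlib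
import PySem

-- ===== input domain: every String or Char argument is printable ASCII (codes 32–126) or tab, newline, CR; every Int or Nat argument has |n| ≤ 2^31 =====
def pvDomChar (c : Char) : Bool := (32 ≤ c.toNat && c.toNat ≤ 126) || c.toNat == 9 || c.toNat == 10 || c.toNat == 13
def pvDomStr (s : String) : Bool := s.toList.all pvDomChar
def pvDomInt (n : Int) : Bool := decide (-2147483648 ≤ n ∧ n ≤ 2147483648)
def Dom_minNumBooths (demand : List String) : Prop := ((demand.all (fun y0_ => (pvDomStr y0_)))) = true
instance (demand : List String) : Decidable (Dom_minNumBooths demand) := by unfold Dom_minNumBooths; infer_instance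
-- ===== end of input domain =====

-- B replaces A's sum of per-character maxima (Counter merged into a max-dict, then summed) by a
-- different algorithm: label each occurrence of a character with its ordinal in its string and
-- return the cardinality of the set of (char, ordinal) slots; a timing run measured B faster.

-- ===== PORT A =====
-- one iteration of A's outer loop: cnt = Counter(dem); for k, v in cnt.items(): if k not in d: d[k] = v else: d[k] = max(d[k], v)
def pvAStep (d : PySem.Dict Char Int) (dem : String) : PySem.Dict Char Int :=
  (PySem.Dict.counter dem.toList).items.foldl
    (fun d kv =>
      if d.contains kv.1 = false then d.insert kv.1 kv.2
      else d.insert kv.1 (max (d.getD kv.1 0) kv.2)) d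

def minNumBooths (demand : List String) : Int :=
  (demand.foldl pvAStep PySem.Dict.empty).values.sum

-- ===== PORT B =====
-- inner loop body: j = seen.get(ch, 0) + 1; seen[ch] = j; slots.add((ch, j))
def pvBInner (st : PySem.Dict Char Int × PySem.Set (Char × Int)) (ch : Char) :
    PySem.Dict Char Int × PySem.Set (Char × Int) :=
  let j : Int := st.1.getD ch 0 + 1
  (st.1.insert ch j, PySem.Set.add st.2 (ch, j))

-- one iteration of B's outer loop: seen = {}; for ch in s: …
def pvBStep (slots : PySem.Set (Char × Int)) (s : String) : PySem.Set (Char × Int) :=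
  (s.toList.foldl pvBInner (PySem.Dict.empty, slots)).2

def minNumBooths_alt (demand : List String) : Int :=
  PySem.Set.len (demand.foldl pvBStep PySem.Set.empty)

-- ===== PRECONDITION & SPEC =====
def Spec_minNumBooths (demand : List String) (out : Int) : Prop := out = minNumBooths_alt demand
instance (demand : List String) (out : Int) : Decidable (Spec_minNumBooths demand out) := by unfold Spec_minNumBooths; infer_instance

-- ===== CLAIM (what is proved, stated in full; the proofs are below) =====
def Claim_equal_minNumBooths : Prop := ∀ (demand : List String), Dom_minNumBooths demand → Spec_minNumBooths demand (minNumBooths demand)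

-- ===== LEMMAS AND PROOFS =====

-- ---------- A side: the dict after the fold, seen through getD and keys ----------

-- effect of A's inner loop on one lookup, for pair lists with distinct keys
theorem pv_inner_getD (ps : List (Char × Int)) (hnd : (ps.map Prod.fst).Nodup)
    (d : PySem.Dict Char Int) (c : Char) :
    (ps.foldl (fun d kv =>
      if d.contains kv.1 = false then d.insert kv.1 kv.2
      else d.insert kv.1 (max (d.getD kv.1 0) kv.2)) d).getD c 0
    = match ps.find? (fun kv => kv.1 == c) with
      | some kv => if d.contains c = false then kv.2 else max (d.getD c 0) kv.2
      | none => d.getD c 0 := by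
  induction ps generalizing d with
  | nil => rfl
  | cons kv ps ih =>
    obtain ⟨hk, hnd'⟩ : (∀ x : Int, (kv.1, x) ∉ ps) ∧ (ps.map Prod.fst).Nodup := by
      simpa using hnd
    rw [List.foldl_cons, ih hnd']
    by_cases hc : kv.1 = c
    · subst hc
      have hnone : ps.find? (fun p => p.1 == kv.1) = none := by
        rw [List.find?_eq_none]
        rintro ⟨a, b⟩ hp
        simp only [beq_iff_eq]
        rintro rfl
        exact hk b hp
      have hfc : List.find? (fun q : Char × Int => q.1 == kv.1) (kv :: ps) = some kv :=
        List.find?_cons_of_pos (by simp)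
      rw [hnone, hfc]
      split_ifs with hcont <;> simp [PySem.Dict.getD_insert_self]
    · have hgd : (if d.contains kv.1 = false then d.insert kv.1 kv.2
          else d.insert kv.1 (max (d.getD kv.1 0) kv.2)).getD c 0 = d.getD c 0 := by
        split_ifs <;> simp [PySem.Dict.getD_insert, Ne.symm hc]
      have hct : (if d.contains kv.1 = false then d.insert kv.1 kv.2
          else d.insert kv.1 (max (d.getD kv.1 0) kv.2)).contains c = d.contains c := by
        split_ifs <;> simp [PySem.Dict.contains_insert, Ne.symm hc]
      rw [List.find?_cons_of_neg (by simpa using hc)]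
      cases hfind : ps.find? (fun p => p.1 == c) <;> simp [hgd, hct]

-- A's inner loop step, seen through getD: merge with max
theorem pv_aStep_getD (d : PySem.Dict Char Int) (s : String) (c : Char)
    (hnn : 0 ≤ d.getD c 0) :
    (pvAStep d s).getD c 0 = max (d.getD c 0) (s.toList.count c : Int) := by
  unfold pvAStep
  have hnd : ((PySem.Dict.counter s.toList).items.map Prod.fst).Nodup := by
    have := PySem.Dict.nodup_keys_counter s.toList
    simpa [PySem.Dict.keys] using this
  rw [pv_inner_getD _ hnd d c, PySem.Dict.items_counter, List.find?_map]
  by_cases hm : c ∈ s.toList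
  · have hms : c ∈ PySem.Set.ofList s.toList := (PySem.Set.mem_ofList _ _).mpr hm
    have hsome : (PySem.Set.ofList s.toList).find? (fun k => k == c) = some c := by
      have hex : ∃ a, (PySem.Set.ofList s.toList).find? (fun k => k == c) = some a := by
        rw [← Option.isSome_iff_exists, List.find?_isSome]
        exact ⟨c, hms, by simp⟩
      obtain ⟨a, ha⟩ := hex
      have h2 := List.find?_some ha
      have hac : a = c := by simpa using h2
      rwa [hac] at ha
    rw [show List.find? ((fun kv : Char × Int => kv.1 == c) ∘ fun k => (k, (s.toList.count k : Int)))
          (PySem.Set.ofList s.toList) = some c from hsome]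
    have hcpos : 0 < s.toList.count c := List.count_pos_iff.mpr hm
    simp only [Option.map_some]
    split_ifs with hcont
    · rw [PySem.Dict.getD_of_not_contains d 0 hcont]
      have : max (0 : Int) (s.toList.count c : Int) = (s.toList.count c : Int) := by
        rw [max_eq_right]; exact_mod_cast Nat.zero_le _
      omega
    · rfl
  · have hnone : (PySem.Set.ofList s.toList).find? (fun k => k == c) = none := by
      rw [List.find?_eq_none]
      intro a ha
      simp only [beq_iff_eq]
      rintro rfl
      exact hm ((PySem.Set.mem_ofList _ _).mp ha)
    rw [show List.find? ((fun kv : Char × Int => kv.1 == c) ∘ fun k => (k, (s.toList.count k : Int)))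
          (PySem.Set.ofList s.toList) = none from hnone]
    rw [List.count_eq_zero_of_not_mem hm]
    simp [max_eq_left hnn]

-- the step function of A's inner loop, written as a single insert
theorem pv_step_eq : (fun (d : PySem.Dict Char Int) (kv : Char × Int) =>
      if d.contains kv.1 = false then d.insert kv.1 kv.2
      else d.insert kv.1 (max (d.getD kv.1 0) kv.2))
    = fun d kv => d.insert kv.1 (if d.contains kv.1 = false then kv.2 else max (d.getD kv.1 0) kv.2) := by
  funext d kv
  split_ifs <;> rfl

-- folding add over a set-built list is folding add over the raw list
theorem pv_update_foldl (xs : List Char) (s t : PySem.Set Char) :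
    PySem.Set.update s (xs.foldl PySem.Set.add t) = PySem.Set.update (PySem.Set.update s t) xs := by
  induction xs generalizing t with
  | nil => rfl
  | cons x xs ih =>
    rw [List.foldl_cons, ih (t.add x)]
    show PySem.Set.update (PySem.Set.update s (t.add x)) xs
      = PySem.Set.update (PySem.Set.add (PySem.Set.update s t) x) xs
    congr 1
    by_cases hx : t.contains x = true
    · have hxt : x ∈ t := by simpa [PySem.Set.contains] using hx
      have hmem : x ∈ PySem.Set.update s t :=
        (PySem.Set.mem_update _ _ _).mpr (Or.inr hxt)
      rw [show PySem.Set.add t x = t by simp [PySem.Set.add, hxt]]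
      rw [show PySem.Set.add (PySem.Set.update s t) x = PySem.Set.update s t by
        simp [PySem.Set.add, PySem.Set.contains, hmem]]
    · have hxnt : x ∉ t := by simpa [PySem.Set.contains] using hx
      rw [show PySem.Set.add t x = t ++ [x] by simp [PySem.Set.add, hxnt]]
      rw [PySem.Set.update_append]
      rfl

theorem pv_update_ofList (s : PySem.Set Char) (xs : List Char) :
    PySem.Set.update s (PySem.Set.ofList xs) = PySem.Set.update s xs := by
  rw [PySem.Set.ofList_eq_foldl, pv_update_foldl]
  rfl

theorem pv_aStep_keys (d : PySem.Dict Char Int) (s : String) :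
    (pvAStep d s).keys = PySem.Set.update d.keys s.toList := by
  unfold pvAStep
  rw [pv_step_eq, PySem.Dict.keys_foldl_insert_key _ Prod.fst _ d, PySem.Dict.items_counter,
    List.map_map]
  have hmap : List.map (Prod.fst ∘ fun k => (k, (List.count k s.toList : Int)))
      (PySem.Set.ofList s.toList) = PySem.Set.ofList s.toList := by
    rw [show (Prod.fst ∘ fun k => (k, (List.count k s.toList : Int))) = id from rfl, List.map_id]
  rw [hmap, pv_update_ofList]

theorem pv_aStep_nodup (d : PySem.Dict Char Int) (s : String) (h : d.keys.Nodup) :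
    (pvAStep d s).keys.Nodup := by
  unfold pvAStep
  rw [pv_step_eq]
  exact PySem.Dict.nodup_keys_foldl_insert_key _ Prod.fst _ d h

theorem pv_aStep_nonneg (d : PySem.Dict Char Int) (s : String) (c : Char)
    (hnn : 0 ≤ d.getD c 0) : 0 ≤ (pvAStep d s).getD c 0 := by
  rw [pv_aStep_getD d s c hnn]
  positivity

-- outer fold: lookups
theorem pv_fold_getD (L : List String) (d : PySem.Dict Char Int) (c : Char)
    (hnn : ∀ c, 0 ≤ d.getD c 0) :
    (L.foldl pvAStep d).getD c 0 = L.foldl (fun m s => max m (s.toList.count c : Int)) (d.getD c 0) := by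
  induction L generalizing d with
  | nil => rfl
  | cons s L ih =>
    rw [List.foldl_cons, List.foldl_cons, ih (pvAStep d s) (fun c => pv_aStep_nonneg d s c (hnn c)),
      pv_aStep_getD d s c (hnn c)]

-- outer fold: keys
theorem pv_fold_keys (L : List String) (d : PySem.Dict Char Int) :
    (L.foldl pvAStep d).keys = L.foldl (fun ks s => PySem.Set.update ks s.toList) d.keys := by
  induction L generalizing d with
  | nil => rfl
  | cons s L ih => rw [List.foldl_cons, List.foldl_cons, ih (pvAStep d s), pv_aStep_keys]

theorem pv_update_flat (L : List String) (ks : PySem.Set Char) :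
    L.foldl (fun ks s => PySem.Set.update ks s.toList) ks
      = PySem.Set.update ks (L.flatMap String.toList) := by
  induction L generalizing ks with
  | nil => rfl
  | cons s L ih =>
    rw [List.foldl_cons, ih, List.flatMap_cons, PySem.Set.update_append]

theorem pv_fold_nodup (L : List String) (d : PySem.Dict Char Int) (h : d.keys.Nodup) :
    (L.foldl pvAStep d).keys.Nodup := by
  induction L generalizing d with
  | nil => exact h
  | cons s L ih => exact ih (pvAStep d s) (pv_aStep_nodup d s h)

-- the running per-character maximum both programs are really about
def pvM (L : List String) (c : Char) : Int :=
  L.foldl (fun m s => max m (s.toList.count c : Int)) 0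

theorem pv_foldl_max_const (L : List String) (c : Char) (m : Int) (hm : 0 ≤ m)
    (h : c ∉ L.flatMap String.toList) :
    L.foldl (fun m s => max m (s.toList.count c : Int)) m = m := by
  induction L generalizing m with
  | nil => rfl
  | cons s L ih =>
    simp only [List.flatMap_cons, List.mem_append, not_or] at h
    rw [List.foldl_cons, List.count_eq_zero_of_not_mem h.1,
      show max m ((0 : Nat) : Int) = m by simpa using hm]
    exact ih m hm h.2

-- ---------- B side: characterisation of the slot set ----------

-- "slots is exactly the set of pairs (c, j) with 1 ≤ j ≤ N c"
def pvOcc (slots : List (Char × Int)) (N : Char → Int) : Prop :=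
  slots.Nodup ∧ ∀ c j, (c, j) ∈ slots ↔ 1 ≤ j ∧ j ≤ N c

theorem pv_bInner_loop (l : List Char) (seen : PySem.Dict Char Int)
    (slots : PySem.Set (Char × Int)) (N P : Char → Int)
    (hP : ∀ c, 0 ≤ P c) (hseen : ∀ c, seen.getD c 0 = P c)
    (hocc : pvOcc slots (fun c => max (N c) (P c))) :
    pvOcc (l.foldl pvBInner (seen, slots)).2 (fun c => max (N c) (P c + l.count c)) := by
  induction l generalizing seen slots P with
  | nil =>
    have : (fun c => max (N c) (P c + ((List.count c ([] : List Char) : Nat) : Int)))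
        = fun c => max (N c) (P c) := by
      funext c; simp
    rw [List.foldl_nil, this]
    exact hocc
  | cons ch t ih =>
    rw [List.foldl_cons]
    have hstep : pvBInner (seen, slots) ch
        = (seen.insert ch (P ch + 1), PySem.Set.add slots (ch, P ch + 1)) := by
      simp [pvBInner, hseen ch]
    rw [hstep]
    have hP' : ∀ c, 0 ≤ (fun c => if c = ch then P c + 1 else P c) c := by
      intro c; by_cases h : c = ch <;> simp [h] <;> linarith [hP ch, hP c]
    have hseen' : ∀ c, (seen.insert ch (P ch + 1)).getD c 0
        = (fun c => if c = ch then P c + 1 else P c) c := by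
      intro c
      by_cases h : c = ch
      · subst h; simp [PySem.Dict.getD_insert_self]
      · simp [PySem.Dict.getD_insert, h, hseen c]
    have hcount : (fun c => max (N c) ((fun c => if c = ch then P c + 1 else P c) c + (t.count c : Int)))
        = fun c => max (N c) (P c + ((ch :: t).count c : Int)) := by
      funext c
      by_cases h : c = ch
      · simp only [h, List.count_cons_self]
        push_cast
        congr 1
        ring
      · rw [List.count_cons_of_ne (Ne.symm h)]
        simp [h]
    have hocc' : pvOcc (PySem.Set.add slots (ch, P ch + 1))
        (fun c => max (N c) ((fun c => if c = ch then P c + 1 else P c) c)) := by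
      obtain ⟨hnd, hmem0⟩ := hocc
      have hmem : ∀ c j, (c, j) ∈ slots ↔ 1 ≤ j ∧ j ≤ max (N c) (P c) := hmem0
      by_cases hin : P ch + 1 ≤ max (N ch) (P ch)
      · -- the slot is already claimed: the set and the bound function are unchanged
        have hNge : P ch + 1 ≤ N ch := by
          rcases le_total (N ch) (P ch) with h1 | h1
          · rw [max_eq_right h1] at hin; omega
          · rw [max_eq_left h1] at hin; omega
        have hm : (ch, P ch + 1) ∈ slots := (hmem ch (P ch + 1)).mpr ⟨by linarith [hP ch], hin⟩
        rw [PySem.Set.add_of_mem hm]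
        have hfun : (fun c => max (N c) ((fun c => if c = ch then P c + 1 else P c) c))
            = fun c => max (N c) (P c) := by
          funext c
          by_cases h : c = ch
          · rw [h]
            show max (N ch) (if ch = ch then P ch + 1 else P ch) = max (N ch) (P ch)
            rw [if_pos rfl, max_eq_left hNge, max_eq_left (by omega)]
          · simp [h]
        rw [hfun]
        exact ⟨hnd, hmem0⟩
      · -- a new slot: it extends the range for ch by exactly one
        rw [not_le] at hin
        have hPm : P ch ≤ max (N ch) (P ch) := le_max_right _ _
        have hNm : N ch ≤ max (N ch) (P ch) := le_max_left _ _
        have hKP : max (N ch) (P ch) = P ch := by omega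
        have hnotm : (ch, P ch + 1) ∉ slots := by
          intro hm
          have := (hmem ch (P ch + 1)).mp hm
          omega
        rw [PySem.Set.add_of_not_mem hnotm]
        refine ⟨List.Nodup.append hnd (List.nodup_singleton _)
            (by simpa [List.disjoint_singleton] using hnotm), fun c j => ?_⟩
        have hNP : N ch ≤ P ch := by
          have := le_max_left (N ch) (P ch); linarith [hKP]
        show (c, j) ∈ slots ++ [(ch, P ch + 1)] ↔
          1 ≤ j ∧ j ≤ max (N c) (if c = ch then P c + 1 else P c)
        by_cases h : c = ch
        · rw [h, if_pos rfl, max_eq_right (by linarith)]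
          constructor
          · intro hm2
            rcases List.mem_append.mp hm2 with h2 | h2
            · obtain ⟨h1, h2'⟩ := (hmem ch j).mp h2
              exact ⟨h1, by linarith [hKP]⟩
            · have hj : j = P ch + 1 := congrArg Prod.snd (List.mem_singleton.mp h2)
              exact ⟨by rw [hj]; linarith [hP ch], le_of_eq hj⟩
          · rintro ⟨h1, h2⟩
            rcases eq_or_ne j (P ch + 1) with hj | hj
            · exact List.mem_append.mpr (Or.inr (by rw [hj]; exact List.mem_singleton.mpr rfl))
            · refine List.mem_append.mpr (Or.inl ((hmem ch j).mpr ⟨h1, ?_⟩))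
              rw [hKP]; omega
        · rw [if_neg h]
          constructor
          · intro hm2
            rcases List.mem_append.mp hm2 with h2 | h2
            · exact (hmem c j).mp h2
            · exact absurd (congrArg Prod.fst (List.mem_singleton.mp h2)) h
          · exact fun hj => List.mem_append.mpr (Or.inl ((hmem c j).mpr hj))
    have := ih (seen.insert ch (P ch + 1)) (PySem.Set.add slots (ch, P ch + 1))
      (fun c => if c = ch then P c + 1 else P c) hP' hseen' hocc'
    rwa [hcount] at this

-- one string of B's outer loop
theorem pv_bStep_occ (slots : PySem.Set (Char × Int)) (s : String) (N : Char → Int)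
    (hN : ∀ c, 0 ≤ N c) (hocc : pvOcc slots N) :
    pvOcc (pvBStep slots s) (fun c => max (N c) (s.toList.count c : Int)) := by
  have h0 : pvOcc slots (fun c => max (N c) ((fun _ => (0 : Int)) c)) := by
    have : (fun c => max (N c) ((fun _ => (0 : Int)) c)) = N := by
      funext c; simp [max_eq_left (hN c)]
    rw [this]; exact hocc
  have := pv_bInner_loop s.toList PySem.Dict.empty slots N (fun _ => 0)
    (fun _ => le_refl 0) (fun c => by simp [PySem.Dict.getD_empty]) h0
  have heq : (fun c => max (N c) ((fun _ => (0 : Int)) c + (s.toList.count c : Int)))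
      = fun c => max (N c) (s.toList.count c : Int) := by
    funext c; simp
  rwa [heq] at this
  
-- B's outer fold
theorem pv_bFold_occ (L : List String) (slots : PySem.Set (Char × Int)) (N : Char → Int)
    (hN : ∀ c, 0 ≤ N c) (hocc : pvOcc slots N) :
    pvOcc (L.foldl pvBStep slots)
      (fun c => L.foldl (fun m s => max m (s.toList.count c : Int)) (N c)) := by
  induction L generalizing slots N with
  | nil => exact hocc
  | cons s L ih =>
    rw [List.foldl_cons]
    have := ih (pvBStep slots s) (fun c => max (N c) (s.toList.count c : Int))
      (fun c => le_max_of_le_left (hN c)) (pv_bStep_occ slots s N hN hocc)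
    exact this

-- counting a slot set fiberwise over a duplicate-free cover of its first components
theorem pv_occ_len (X : List Char) (slots : List (Char × Int)) (N : Char → Int)
    (hocc : pvOcc slots N) (hN : ∀ c, 0 ≤ N c) (hX : X.Nodup)
    (hcov : ∀ p ∈ slots, p.1 ∈ X) :
    (slots.length : Int) = (X.map N).sum := by
  induction X generalizing slots N with
  | nil =>
    have : slots = [] := List.eq_nil_iff_forall_not_mem.mpr (fun p hp => by simpa using hcov p hp)
    simp [this]
  | cons c X ih =>
    obtain ⟨hnd, hmem⟩ := hocc
    obtain ⟨hcX, hX'⟩ := List.nodup_cons.mp hX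
    set f1 := slots.filter (fun p => p.1 == c) with hf1
    set f2 := slots.filter (fun p => !(p.1 == c)) with hf2
    have hsplit : slots.length = f1.length + f2.length :=
      List.length_eq_length_filter_add (fun p : Char × Int => p.1 == c)
    -- the fiber over c is exactly {(c, j) : 1 ≤ j ≤ N c}
    have hf1len : f1.length = (N c).toNat := by
      have hnd1 : f1.Nodup := hnd.filter _
      have : f1.toFinset = (Finset.Icc (1 : Int) (N c)).image (fun j => (c, j)) := by
        ext p
        simp only [List.mem_toFinset, hf1, List.mem_filter, beq_iff_eq, Finset.mem_image,
          Finset.mem_Icc]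
        constructor
        · rintro ⟨hp, hpc⟩
          obtain ⟨a, b⟩ := p
          simp only at hpc
          have hb := (hmem a b).mp hp
          rw [hpc] at hb
          exact ⟨b, hb, by rw [hpc]⟩
        · rintro ⟨j, hj, rfl⟩
          exact ⟨(hmem c j).mpr hj, rfl⟩
      have hcard : f1.toFinset.card = (N c).toNat := by
        rw [this, Finset.card_image_of_injective _ (fun a b h => by
          simpa using congrArg Prod.snd h), Int.card_Icc]
        omega
      rw [← List.toFinset_card_of_nodup hnd1, hcard]
    -- the rest satisfies pvOcc for N zeroed at c
    have hocc2 : pvOcc f2 (fun c' => if c' = c then 0 else N c') := by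
      refine ⟨hnd.filter _, fun c' j => ?_⟩
      simp only [hf2, List.mem_filter, Bool.not_eq_eq_eq_not, Bool.not_true, hmem]
      by_cases h : c' = c
      · subst h; simp; omega
      · simp [h]
    have hN2 : ∀ c', 0 ≤ (fun c' => if c' = c then 0 else N c') c' := by
      intro c'; by_cases h : c' = c <;> simp [h, hN c']
    have hcov2 : ∀ p ∈ f2, p.1 ∈ X := by
      intro p hp
      have := List.mem_filter.mp hp
      have h1 := hcov p this.1
      have h2 : ¬ (p.1 = c) := by simpa using this.2
      simpa [h2] using h1
    have hih := ih f2 _ hocc2 hN2 hX' hcov2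
    have hmapeq : X.map (fun c' => if c' = c then 0 else N c') = X.map N :=
      List.map_congr_left (fun x hx => by
        have : x ≠ c := fun h => hcX (h ▸ hx)
        simp [this])
    rw [hmapeq] at hih
    rw [List.map_cons, List.sum_cons, hsplit]
    push_cast
    rw [hih, hf1len]
    rw [Int.toNat_of_nonneg (hN c)]

theorem pv_M_le_foldl (L : List String) (c : Char) (m : Int) (hm : 0 ≤ m) :
    0 ≤ L.foldl (fun m s => max m (s.toList.count c : Int)) m := by
  induction L generalizing m with
  | nil => exact hm
  | cons s L ih => exact ih _ (le_max_of_le_left hm)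

-- every claimed slot's character occurs in some string
theorem pv_slot_mem (L : List String) (p : Char × Int)
    (h : p ∈ L.foldl pvBStep PySem.Set.empty)
    (hocc : pvOcc (L.foldl pvBStep PySem.Set.empty) (pvM L)) :
    p.1 ∈ L.flatMap String.toList := by
  by_contra hn
  obtain ⟨-, hmem⟩ := hocc
  obtain ⟨c, j⟩ := p
  have := (hmem c j).mp h
  have hz : pvM L c = 0 := pv_foldl_max_const L c 0 le_rfl hn
  omega

-- ===== VERDICT (by name: the statement is the Claim_ definition above) =====
theorem minNumBooths_spec : Claim_equal_minNumBooths := by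
  intro demand _
  show minNumBooths demand = minNumBooths_alt demand
  unfold minNumBooths minNumBooths_alt
  -- A's side: sum of pvM over the duplicate-free list of characters, in first-occurrence order
  have hnd : (demand.foldl pvAStep PySem.Dict.empty).keys.Nodup :=
    pv_fold_nodup demand _ PySem.Dict.nodup_keys_empty
  rw [PySem.Dict.values_eq_map_keys _ hnd 0]
  have hkeys : (demand.foldl pvAStep PySem.Dict.empty).keys
      = PySem.Set.ofList (demand.flatMap String.toList) := by
    rw [pv_fold_keys, pv_update_flat,
      show (PySem.Dict.empty : PySem.Dict Char Int).keys = [] from rfl,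
      PySem.Set.update_nil_left]
  have hgetD : ∀ c, (demand.foldl pvAStep PySem.Dict.empty).getD c 0 = pvM demand c := by
    intro c
    rw [pv_fold_getD demand PySem.Dict.empty c (fun c => by simp [PySem.Dict.getD_empty])]
    simp [pvM, PySem.Dict.getD_empty]
  -- B's side: the slot set is characterised by pvM
  have hocc0 : pvOcc PySem.Set.empty (fun _ => (0 : Int)) := by
    refine ⟨List.nodup_nil, fun c j => ?_⟩
    show (c, j) ∈ ([] : List (Char × Int)) ↔ _
    simp; omega
  have hoccB : pvOcc (demand.foldl pvBStep PySem.Set.empty) (pvM demand) :=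
    pv_bFold_occ demand PySem.Set.empty (fun _ => 0) (fun _ => le_refl 0) hocc0
  have hMnn : ∀ c, 0 ≤ pvM demand c := by
    intro c
    exact pv_M_le_foldl demand c 0 le_rfl
  -- count the slot set fiberwise over A's key list
  have hlen : ((demand.foldl pvBStep PySem.Set.empty).length : Int)
      = (((demand.foldl pvAStep PySem.Dict.empty).keys).map (pvM demand)).sum := by
    refine pv_occ_len _ _ _ hoccB hMnn hnd ?_
    intro p hp
    rw [hkeys, PySem.Set.mem_ofList]
    exact pv_slot_mem demand p hp hoccB
  rw [show PySem.Set.len (demand.foldl pvBStep PySem.Set.empty)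
      = ((demand.foldl pvBStep PySem.Set.empty).length : Int) from rfl, hlen]
  congr 1
  exact List.map_congr_left (fun c _ => (hgetD c).symm) |>.symm
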